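-- pv_equiv track=rewrite | github.com/CJOWakefield/MyLeetcode | 1861_rotating_the_box.py | rotateTheBox_II
-- ===== SOURCE A (Python) =====
-- def rotateTheBox_II(boxGrid: list[list[str]]) -> list[list[str]]:
--     m, n = len(boxGrid), len(boxGrid[0])
--     res = [['.'] * m for _ in range(n)]
--
--     for i in range(m):
--         new_row, empty_pos = m-i-1, n-1
--         for j in range(n - 1, -1, -1):
--             if boxGrid[i][j] == '#':
--                 res[empty_pos][new_row] = '#'
--                 empty_pos -= 1
--             elif boxGrid[i][j] == '*':
--                 res[j][new_row] = '*'
--                 empty_pos = j - 1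
--
--     return res
-- ===== SOURCE B (Python) =====
-- def rotateTheBox_II(boxGrid: list[list[str]]) -> list[list[str]]:
--     m, n = len(boxGrid), len(boxGrid[0])
--
--     def settle(row):
--         out, dots, stones = [], 0, 0
--         for c in row[:n]:
--             if c == '#':
--                 stones += 1
--             elif c == '*':
--                 out += ['.'] * dots + ['#'] * stones + ['*']
--                 dots = stones = 0
--             else:
--                 dots += 1
--         return out + ['.'] * dots + ['#'] * stones
--
--     settled = [settle(row) for row in boxGrid]
--     return [[settled[m - 1 - k][j] for k in range(m)] for j in range(n)]
-- ===== Notes on version B (the rewrite author's own statement) =====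
-- stated objective: alternative
-- what changed: B replaces A's fused single pass (mutating a preallocated rotated grid with a right-to-left write pointer per row) by two separate phases: each row is settled left-to-right by counting dots and stones per '*'-delimited segment and emitting them in bulk, and the settled grid is then rotated 90 degrees clockwise by index arithmetic.
import Mathlib
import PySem

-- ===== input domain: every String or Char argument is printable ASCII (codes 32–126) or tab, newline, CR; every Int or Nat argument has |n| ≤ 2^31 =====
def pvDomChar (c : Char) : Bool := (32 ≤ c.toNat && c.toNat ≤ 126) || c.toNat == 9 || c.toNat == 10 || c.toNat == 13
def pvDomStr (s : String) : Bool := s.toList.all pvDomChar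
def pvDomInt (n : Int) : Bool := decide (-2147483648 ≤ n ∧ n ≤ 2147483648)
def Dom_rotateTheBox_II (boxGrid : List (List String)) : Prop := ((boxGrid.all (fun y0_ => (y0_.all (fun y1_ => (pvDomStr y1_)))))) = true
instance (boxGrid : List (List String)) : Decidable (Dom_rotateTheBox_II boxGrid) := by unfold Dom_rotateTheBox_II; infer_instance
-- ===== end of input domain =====

-- B replaces A's fused single pass (write-pointer gravity into a preallocated rotated grid)
-- by two phases: a left-to-right segment-counting settle of each row, then an index-arithmetic
-- 90° clockwise rotation; objective: alternative (same O(m·n) cost, different algorithm).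

-- ===== PORT A =====
-- inner loop body of A: state (res, empty_pos), loop variable j; new_row = m - i - 1
def pvBodyA (grid : List (List String)) (m i : Int) (s : List (List String) × Int) (j : Int) :
    List (List String) × Int :=
  if PySem.List.pyGetD (PySem.List.pyGetD grid i []) j "" == "#" then
    (PySem.List.pySetD s.1 s.2 (PySem.List.pySetD (PySem.List.pyGetD s.1 s.2 []) (m - i - 1) "#"), s.2 - 1)
  else if PySem.List.pyGetD (PySem.List.pyGetD grid i []) j "" == "*" then
    (PySem.List.pySetD s.1 j (PySem.List.pySetD (PySem.List.pyGetD s.1 j []) (m - i - 1) "*"), j - 1)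
  else s

-- outer loop body of A: one row i, inner loop j from n-1 down to 0 with empty_pos starting at n-1
def pvOuterA (grid : List (List String)) (m n : Int) (res : List (List String)) (i : Int) :
    List (List String) :=
  ((PySem.List.pyRange (n - 1) (-1) (-1)).foldl (pvBodyA grid m i) (res, n - 1)).1

def rotateTheBox_II (boxGrid : List (List String)) : List (List String) :=
  let m : Int := boxGrid.length
  let n : Int := (PySem.List.pyGetD boxGrid 0 []).length
  (PySem.List.pyRange 0 m 1).foldl (pvOuterA boxGrid m n)
    ((PySem.List.pyRange 0 n 1).map (fun _ => List.replicate m.toNat "."))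

-- ===== PORT B =====
-- B's settle: one left-to-right pass with state (out, dots, stones), flushing at each '*'
def pvSettle (row : List String) : List String :=
  let s := row.foldl (fun (s : List String × Nat × Nat) c =>
      if c == "#" then (s.1, s.2.1, s.2.2 + 1)
      else if c == "*" then
        (s.1 ++ (List.replicate s.2.1 "." ++ List.replicate s.2.2 "#" ++ ["*"]), 0, 0)
      else (s.1, s.2.1 + 1, s.2.2)) ([], 0, 0)
  s.1 ++ (List.replicate s.2.1 "." ++ List.replicate s.2.2 "#")

def rotateTheBox_II_alt (boxGrid : List (List String)) : List (List String) :=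
  let m : Int := boxGrid.length
  let n : Int := (PySem.List.pyGetD boxGrid 0 []).length
  let settled := boxGrid.map (fun row => pvSettle (PySem.List.slice row none (some n)))
  (PySem.List.pyRange 0 n 1).map (fun j =>
    (PySem.List.pyRange 0 m 1).map (fun k =>
      PySem.List.pyGetD (PySem.List.pyGetD settled (m - 1 - k) []) j "."))

-- ===== PRECONDITION & SPEC =====
-- Pre_ excludes exactly the inputs where A raises: the empty grid (boxGrid[0] IndexError) and
-- grids with a row shorter than the first row (boxGrid[i][j] IndexError).
def Pre_rotateTheBox_II (boxGrid : List (List String)) : Prop :=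
  boxGrid ≠ [] ∧ ∀ row ∈ boxGrid, (boxGrid.headD []).length ≤ row.length

instance (boxGrid : List (List String)) : Decidable (Pre_rotateTheBox_II boxGrid) := by
  unfold Pre_rotateTheBox_II; infer_instance

def pvWitness_rotateTheBox_II : List (List String) :=
  [["#", ".", "*"], [".", "#", "#"]]

def Spec_rotateTheBox_II (boxGrid : List (List String)) (out : List (List String)) : Prop :=
  out = rotateTheBox_II_alt boxGrid
instance (boxGrid : List (List String)) (out : List (List String)) :
    Decidable (Spec_rotateTheBox_II boxGrid out) := by unfold Spec_rotateTheBox_II; infer_instance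

-- ===== CLAIM (what is proved, stated in full; the proofs are below) =====
def Claim_equal_rotateTheBox_II : Prop := ∀ (boxGrid : List (List String)),
  Dom_rotateTheBox_II boxGrid → Pre_rotateTheBox_II boxGrid →
  Spec_rotateTheBox_II boxGrid (rotateTheBox_II boxGrid)

-- ===== LEMMAS AND PROOFS =====

-- number of non-'#' cells before the first '*'
def dcount : List String → Nat
  | [] => 0
  | c :: r => if c = "*" then 0 else if c = "#" then dcount r else dcount r + 1

-- the settled row (stones fall to the right within each '*'-delimited segment)
def segSettle : List String → List String
  | [] => []
  | c :: r =>
    if c = "*" then "*" :: segSettle r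
    else if c = "#" then ("." :: segSettle r).set (dcount r) "#"
    else "." :: segSettle r

-- res[r][c] = ch
def writeCell (res : List (List String)) (r c : Nat) (ch : String) : List (List String) :=
  res.set r ((res.getD r []).set c ch)

-- write column values v into column c of res, starting at row j, skipping '.' entries
def overlay (c : Nat) : Nat → List String → List (List String) → List (List String)
  | _, [], res => res
  | j, ch :: v, res => overlay c (j + 1) v (if ch = "." then res else writeCell res j c ch)

theorem getD_set_ne' {α : Type} [Inhabited α] (l : List α) (i j : Nat) (a d : α) (h : i ≠ j) :
    (l.set i a).getD j d = l.getD j d := by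
  simp [List.getD, List.getElem?_set_ne h]

theorem getD_set_eq' {α : Type} [Inhabited α] (l : List α) (i : Nat) (a d : α)
    (h : i < l.length) : (l.set i a).getD i d = a := by
  simp [List.getD, h]

theorem length_segSettle (l : List String) : (segSettle l).length = l.length := by
  induction l with
  | nil => rfl
  | cons c r ih => simp only [segSettle]; split_ifs <;> simp [ih]

theorem dcount_le (l : List String) : dcount l ≤ l.length := by
  induction l with
  | nil => simp [dcount]
  | cons c r ih => simp only [dcount, List.length_cons]; split_ifs <;> omega

theorem segSettle_getD_lt_dcount (l : List String) (k : Nat) (hk : k < dcount l) :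
    (segSettle l).getD k "" = "." := by
  induction l generalizing k with
  | nil => simp [dcount] at hk
  | cons c r ih =>
    by_cases h1 : c = "*"
    · simp [dcount, h1] at hk
    by_cases h2 : c = "#"
    · simp only [dcount, if_neg h1, if_pos h2] at hk
      simp only [segSettle, if_neg h1, if_pos h2]
      rw [getD_set_ne' _ _ _ _ _ (by omega)]
      match k with
      | 0 => rfl
      | k + 1 => simpa [List.getD] using ih k (by omega)
    · simp only [dcount, if_neg h1, if_neg h2] at hk
      simp only [segSettle, if_neg h1, if_neg h2]
      match k with
      | 0 => rfl
      | k + 1 => simpa [List.getD] using ih k (by omega)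

theorem length_writeCell (res : List (List String)) (r c : Nat) (ch : String) :
    (writeCell res r c ch).length = res.length := by
  simp [writeCell]

theorem getD_writeCell_ne (res : List (List String)) (r c : Nat) (ch : String)
    (r' : Nat) (h : r' ≠ r) : (writeCell res r c ch).getD r' [] = res.getD r' [] := by
  unfold writeCell; exact getD_set_ne' _ _ _ _ _ h.symm

theorem getD_writeCell_self (res : List (List String)) (r c : Nat) (ch : String)
    (h : r < res.length) : (writeCell res r c ch).getD r [] = (res.getD r []).set c ch := by
  unfold writeCell; exact getD_set_eq' _ _ _ _ h

theorem writeCell_comm (res : List (List String)) (r c : Nat) (ch : String)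
    (r' c' : Nat) (ch' : String) (h : r ≠ r') :
    writeCell (writeCell res r c ch) r' c' ch' = writeCell (writeCell res r' c' ch') r c ch := by
  unfold writeCell
  rw [getD_set_ne' _ _ _ _ _ h, getD_set_ne' _ _ _ _ _ h.symm]
  exact List.set_comm _ _ h

theorem overlay_writeCell (c : Nat) (v : List String) (j : Nat) (res : List (List String))
    (r c' : Nat) (ch : String) (h : r < j) :
    overlay c j v (writeCell res r c' ch) = writeCell (overlay c j v res) r c' ch := by
  induction v generalizing j res with
  | nil => rfl
  | cons a v ih =>
    simp only [overlay]
    by_cases ha : a = "."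
    · rw [if_pos ha, if_pos ha, ih _ _ (by omega)]
    · rw [if_neg ha, if_neg ha, writeCell_comm _ _ _ _ _ _ _ (by omega),
        ih _ _ (by omega)]

theorem overlay_set (c : Nat) (v : List String) (j : Nat) (res : List (List String))
    (k : Nat) (ch : String) (hk : k < v.length) (hv : v.getD k "" = ".") (hch : ch ≠ ".") :
    overlay c j (v.set k ch) res = writeCell (overlay c j v res) (j + k) c ch := by
  induction v generalizing j res k with
  | nil => simp at hk
  | cons a v ih =>
    match k with
    | 0 =>
      have ha : a = "." := by simpa [List.getD] using hv
      simp only [List.set, overlay, if_neg hch, if_pos ha]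
      rw [overlay_writeCell _ _ _ _ _ _ _ (by omega)]
      rfl
    | k + 1 =>
      have hv' : v.getD k "" = "." := by simpa [List.getD] using hv
      simp only [List.set, overlay]
      rw [ih _ _ k (by simpa using hk) hv']
      congr 1
      omega

theorem length_overlay (c : Nat) (v : List String) (j : Nat) (res : List (List String)) :
    (overlay c j v res).length = res.length := by
  induction v generalizing j res with
  | nil => rfl
  | cons a v ih => simp only [overlay]; rw [ih]; split_ifs <;> simp [length_writeCell]

theorem length_getD_writeCell (res : List (List String)) (r0 c : Nat) (a : String) (r : Nat) :
    ((writeCell res r0 c a).getD r []).length = (res.getD r []).length := by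
  by_cases hr : r = r0
  · subst hr
    by_cases hl : r < res.length
    · rw [getD_writeCell_self _ _ _ _ hl]; simp
    · unfold writeCell
      rw [List.set_eq_of_length_le (by omega)]
  · rw [getD_writeCell_ne _ _ _ _ _ hr]

theorem length_getD_overlay (c : Nat) (v : List String) (j : Nat) (res : List (List String))
    (r : Nat) : ((overlay c j v res).getD r []).length = (res.getD r []).length := by
  induction v generalizing j res with
  | nil => rfl
  | cons a v ih =>
    simp only [overlay]; rw [ih]
    split_ifs with ha
    · rfl
    · exact length_getD_writeCell _ _ _ _ _

theorem getD_overlay_lt (c : Nat) (v : List String) (j : Nat) (res : List (List String))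
    (r : Nat) (h : r < j) : (overlay c j v res).getD r [] = res.getD r [] := by
  induction v generalizing j res with
  | nil => rfl
  | cons a v ih =>
    simp only [overlay]; rw [ih _ _ (by omega)]
    split_ifs with ha
    · rfl
    · exact getD_writeCell_ne _ _ _ _ _ (by omega)

theorem getD_overlay_row (c : Nat) (v : List String) (j : Nat) (res : List (List String))
    (r : Nat) (h1 : j ≤ r) (h2 : r - j < v.length) (h3 : r < res.length) :
    (overlay c j v res).getD r [] =
      if v.getD (r - j) "" = "." then res.getD r []
      else (res.getD r []).set c (v.getD (r - j) "") := by
  induction v generalizing j res with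
  | nil => simp at h2
  | cons a v ih =>
    simp only [overlay]
    by_cases hr : r = j
    · subst hr
      rw [getD_overlay_lt _ _ _ _ _ (by omega), Nat.sub_self]
      have hget : (a :: v).getD 0 "" = a := rfl
      rw [hget]
      by_cases ha : a = "."
      · simp only [if_pos ha]
      · simp only [if_neg ha]
        exact getD_writeCell_self _ _ _ _ h3
    · have hj : j + 1 ≤ r := by omega
      have hgd : (a :: v).getD (r - j) "" = v.getD (r - (j + 1)) "" := by
        have : r - j = (r - (j + 1)) + 1 := by omega
        rw [this]; rfl
      have hlen : r < (if a = "." then res else writeCell res j c a).length := by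
        split_ifs
        · omega
        · rw [length_writeCell]; omega
      rw [ih _ _ hj (by simp at h2 ⊢; omega) hlen, hgd]
      have hres1 : (if a = "." then res else writeCell res j c a).getD r [] = res.getD r [] := by
        split_ifs with ha
        · rfl
        · exact getD_writeCell_ne _ _ _ _ _ hr
      rw [hres1]

-- ===== B-side: pvSettle computes segSettle =====

theorem dcount_cons_other (c : String) (l : List String) (h1 : ¬c = "*") (h2 : ¬c = "#") :
    dcount (c :: l) = dcount l + 1 := by
  simp [dcount, h1, h2]

theorem dcount_hash_append (s : Nat) (l : List String) :
    dcount (List.replicate s "#" ++ l) = dcount l := by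
  induction s with
  | zero => rfl
  | succ s ih => simp only [List.replicate_succ, List.cons_append, dcount]; simp [ih]

theorem segSettle_cons_other (c : String) (l : List String) (h1 : ¬c = "*") (h2 : ¬c = "#") :
    segSettle (c :: l) = "." :: segSettle l := by
  simp [segSettle, h1, h2]

theorem segSettle_dot_append (d : Nat) (t : List String) :
    segSettle (List.replicate d "." ++ t) = List.replicate d "." ++ segSettle t := by
  induction d with
  | zero => rfl
  | succ d ih =>
    simp only [List.replicate_succ, List.cons_append]
    rw [segSettle_cons_other _ _ (by decide) (by decide), ih]

theorem segSettle_hash_other (s : Nat) (x : String) (l : List String)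
    (h1 : ¬x = "*") (h2 : ¬x = "#") :
    segSettle (List.replicate s "#" ++ x :: l) = "." :: segSettle (List.replicate s "#" ++ l) := by
  induction s with
  | zero => exact segSettle_cons_other _ _ h1 h2
  | succ s ih =>
    simp only [List.replicate_succ, List.cons_append, segSettle,
      if_neg (by decide : ¬("#" : String) = "*"), if_true]
    rw [ih, dcount_hash_append, dcount_hash_append, dcount_cons_other _ _ h1 h2]
    rfl

theorem segSettle_hash_star (s : Nat) (l : List String) :
    segSettle (List.replicate s "#" ++ "*" :: l) =
      List.replicate s "#" ++ "*" :: segSettle l := by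
  induction s with
  | zero => simp [segSettle]
  | succ s ih =>
    simp only [List.replicate_succ, List.cons_append, segSettle,
      if_neg (by decide : ¬("#" : String) = "*"), if_true]
    rw [ih, dcount_hash_append]
    simp [dcount]

theorem segSettle_hash_nil (s : Nat) :
    segSettle (List.replicate s "#") = List.replicate s "#" := by
  induction s with
  | zero => rfl
  | succ s ih =>
    simp only [List.replicate_succ, segSettle,
      if_neg (by decide : ¬("#" : String) = "*"), if_true]
    rw [ih, show dcount (List.replicate s "#") = 0 from by
      simpa [dcount] using dcount_hash_append s []]
    rfl

def finishSettle (t : List String × Nat × Nat) : List String :=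
  t.1 ++ (List.replicate t.2.1 "." ++ List.replicate t.2.2 "#")

theorem pvSettle_fold (l : List String) : ∀ (out : List String) (d st : Nat),
    finishSettle
      (l.foldl (fun (s : List String × Nat × Nat) c =>
        if c == "#" then (s.1, s.2.1, s.2.2 + 1)
        else if c == "*" then
          (s.1 ++ (List.replicate s.2.1 "." ++ List.replicate s.2.2 "#" ++ ["*"]), 0, 0)
        else (s.1, s.2.1 + 1, s.2.2)) (out, d, st))
      = out ++ segSettle (List.replicate d "." ++ (List.replicate st "#" ++ l)) := by
  induction l with
  | nil =>
    intro out d st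
    simp [finishSettle, segSettle_dot_append, segSettle_hash_nil, List.append_assoc]
  | cons c l ih =>
    intro out d st
    simp only [List.foldl_cons]
    by_cases hc : c = "#"
    · rw [if_pos (by simpa using hc)]
      rw [ih out d (st + 1)]
      congr 2
      rw [List.replicate_succ' (n := st) (a := "#")]
      simp [List.append_assoc, hc]
    · rw [if_neg (by simpa using hc)]
      by_cases hs : c = "*"
      · rw [if_pos (by simpa using hs)]
        rw [ih _ 0 0]
        simp only [List.replicate_zero, List.nil_append]
        rw [segSettle_dot_append, hs, segSettle_hash_star]
        simp [List.append_assoc]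
      · rw [if_neg (by simpa using hs)]
        rw [ih out (d + 1) st]
        rw [segSettle_dot_append, segSettle_dot_append, segSettle_hash_other _ _ _ hs hc]
        rw [List.replicate_succ' (n := d) (a := ".")]
        simp [List.append_assoc]

theorem pvSettle_eq_segSettle (l : List String) : pvSettle l = segSettle l := by
  have h := pvSettle_fold l [] 0 0
  simpa [pvSettle, finishSettle] using h

-- ===== A-side: the inner loop computes an overlay of the settled column =====

theorem innerA_suffix (grid : List (List String)) (m i : Int) (cN : Nat)
    (hc : m - i - 1 = (cN : Nat)) (N : Nat) (hrow : N ≤ (PySem.List.pyGetD grid i []).length) :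
    ∀ (t j : Nat), j + t = N → ∀ (res : List (List String)),
    (PySem.List.pyRange ((N : Int) - 1) ((j : Int) - 1) (-1)).foldl (pvBodyA grid m i)
        (res, (N : Int) - 1) =
      (overlay cN j (segSettle (((PySem.List.pyGetD grid i []).take N).drop j)) res,
       (j : Int) + (dcount (((PySem.List.pyGetD grid i []).take N).drop j) : Int) - 1) := by
  intro t
  induction t with
  | zero =>
    intro j hj res
    subst hj
    rw [PySem.List.pyRange_neg_one_eq_nil (by omega)]
    have hlen : ((PySem.List.pyGetD grid i []).take (j + 0)).length = j + 0 := by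
      simp; omega
    rw [List.drop_of_length_le (by omega)]
    simp [overlay, segSettle, dcount]
  | succ t ih =>
    intro j hj res
    have hjN : j < N := by omega
    -- split the countdown range: [N-1, …, j] = [N-1, …, j+1] ++ [j]
    have hsplit : PySem.List.pyRange ((N : Int) - 1) ((j : Int) - 1) (-1) =
        PySem.List.pyRange ((N : Int) - 1) ((j : Int)) (-1) ++ [(j : Int)] := by
      rw [PySem.List.pyRange_neg_one_eq_reverse, PySem.List.pyRange_neg_one_eq_reverse]
      have h1 : (j : Int) - 1 + 1 = (j : Int) := by ring
      have h2 : (N : Int) - 1 + 1 = (N : Int) := by ring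
      rw [h1, h2, PySem.List.pyRange_one_cons (by exact_mod_cast hjN)]
      simp
    rw [hsplit, List.foldl_append]
    have IH := ih (j + 1) (by omega) res
    rw [show ((j + 1 : Nat) : Int) - 1 = (j : Int) by push_cast; ring] at IH
    rw [IH]
    set row := PySem.List.pyGetD grid i [] with hrowdef
    have hrowlen : j < row.length := by omega
    have htlen : (row.take N).length = N := by simp; omega
    set x := (row.take N).getD j "" with hxdef
    have hdrop : (row.take N).drop j = x :: (row.take N).drop (j + 1) := by
      rw [List.drop_eq_getElem_cons (by omega)]
      rw [hxdef, List.getD_eq_getElem _ _ (by omega)]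
    have hx : PySem.List.pyGetD row (j : Int) "" = x := by
      rw [PySem.List.pyGetD_natCast, hxdef,
        List.getD_eq_getElem (row.take N) _ (by simp; omega),
        List.getD_eq_getElem row _ hrowlen]
      simp [List.getElem_take]
    set s' := (row.take N).drop (j + 1) with hs'def
    set S' := segSettle s' with hS'def
    set d' := dcount s' with hd'def
    simp only [List.foldl_cons, List.foldl_nil, pvBodyA]
    rw [← hrowdef, hx, hdrop]
    by_cases hxh : x = "#"
    · rw [if_pos (show (x == "#") = true by rw [hxh]; decide)]
      have he : ((j + 1 : Nat) : Int) + (d' : Int) - 1 = ((j + d' : Nat) : Int) := by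
        push_cast; ring
      rw [he, PySem.List.pyGetD_natCast, PySem.List.pySetD_natCast, hc,
        PySem.List.pySetD_natCast]
      have hv : (("." : String) :: S').getD d' "" = "." := by
        match hd : d' with
        | 0 => rfl
        | d + 1 =>
          have : (("." : String) :: S').getD (d + 1) "" = S'.getD d "" := rfl
          rw [this, hS'def]
          exact segSettle_getD_lt_dcount s' d (by omega)
      have hset : segSettle (x :: s') = (("." : String) :: S').set d' "#" := by
        rw [hxh]; simp [segSettle, hS'def, hd'def]
      rw [hset, overlay_set _ _ _ _ _ _
        (by simp [hS'def, length_segSettle]; have := dcount_le s'; omega) hv (by decide)]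
      have hskip : overlay cN j ("." :: S') res = overlay cN (j + 1) S' res := by
        simp [overlay]
      rw [hskip]
      have hdc : dcount (x :: s') = d' := by rw [hxh]; simp [dcount, hd'def]
      rw [hdc]
      refine Prod.ext rfl ?_
      show ((j + d' : Nat) : Int) - 1 = (j : Int) + (d' : Int) - 1
      push_cast; ring
    · rw [if_neg (show ¬(x == "#") = true by simp [hxh])]
      by_cases hxs : x = "*"
      · rw [if_pos (show (x == "*") = true by rw [hxs]; decide)]
        rw [PySem.List.pyGetD_natCast, PySem.List.pySetD_natCast, hc,
          PySem.List.pySetD_natCast]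
        have hset : segSettle (x :: s') = "*" :: S' := by rw [hxs, hS'def]; simp [segSettle]
        rw [hset]
        have hstep : overlay cN j ("*" :: S') res =
            overlay cN (j + 1) S' (writeCell res j cN "*") := by
          simp [overlay, writeCell]
        rw [hstep, overlay_writeCell _ _ _ _ _ _ _ (by omega)]
        have hdc : dcount (x :: s') = 0 := by rw [hxs]; simp [dcount]
        rw [hdc]
        refine Prod.ext rfl ?_
        show (j : Int) - 1 = (j : Int) + ((0 : Nat) : Int) - 1
        push_cast; ring
      · rw [if_neg (show ¬(x == "*") = true by simp [hxs])]
        have hset : segSettle (x :: s') = "." :: S' := segSettle_cons_other _ _ hxs hxh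
        rw [hset]
        have hskip : overlay cN j ("." :: S') res = overlay cN (j + 1) S' res := by
          simp [overlay]
        rw [hskip]
        have hdc : dcount (x :: s') = d' + 1 := by
          rw [dcount_cons_other _ _ hxs hxh, ← hd'def]
        rw [hdc]
        refine Prod.ext rfl ?_
        show ((j + 1 : Nat) : Int) + (d' : Int) - 1 = (j : Int) + ((d' + 1 : Nat) : Int) - 1
        push_cast; ring

-- ===== the outer loop and the final glue =====

-- state of A's res after the first t outer iterations
def resAt (boxGrid : List (List String)) (N : Nat) : Nat → List (List String)
  | 0 => List.replicate N (List.replicate boxGrid.length ".")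
  | t + 1 => overlay (boxGrid.length - 1 - t) 0
      (segSettle ((boxGrid.getD t []).take N)) (resAt boxGrid N t)

theorem outerA_fold (boxGrid : List (List String)) (N : Nat)
    (hrows : ∀ row ∈ boxGrid, N ≤ row.length) :
    ∀ t, t ≤ boxGrid.length →
      (PySem.List.pyRange 0 (t : Int) 1).foldl
        (pvOuterA boxGrid (boxGrid.length : Int) (N : Int))
        (resAt boxGrid N 0) = resAt boxGrid N t := by
  intro t
  induction t with
  | zero => intro _; rw [show ((0 : Nat) : Int) = 0 from rfl, PySem.List.pyRange_one_eq_nil le_rfl]; rfl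
  | succ t ih =>
    intro ht
    have htM : t < boxGrid.length := by omega
    rw [show ((t + 1 : Nat) : Int) = (t : Int) + 1 by push_cast; ring,
      PySem.List.pyRange_one_succ_right (by positivity), List.foldl_append,
      ih (by omega)]
    simp only [List.foldl_cons, List.foldl_nil]
    show pvOuterA boxGrid _ _ (resAt boxGrid N t) (t : Int) = _
    unfold pvOuterA
    have hrowlen : N ≤ (PySem.List.pyGetD boxGrid (t : Int) []).length := by
      rw [PySem.List.pyGetD_natCast, List.getD_eq_getElem _ _ htM]
      exact hrows _ (List.getElem_mem htM)
    have hc : (boxGrid.length : Int) - (t : Int) - 1 =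
        ((boxGrid.length - 1 - t : Nat) : Int) := by omega
    have h := innerA_suffix boxGrid (boxGrid.length : Int) (t : Int)
      (boxGrid.length - 1 - t) hc N hrowlen N 0 (by omega) (resAt boxGrid N t)
    rw [show ((0 : Nat) : Int) - 1 = -1 from rfl] at h
    rw [h]
    simp only [List.drop_zero, resAt]
    rw [PySem.List.pyGetD_natCast]

theorem resAt_entries (boxGrid : List (List String)) (N : Nat)
    (hrows : ∀ row ∈ boxGrid, N ≤ row.length) :
    ∀ t, t ≤ boxGrid.length →
      (resAt boxGrid N t).length = N ∧
      ∀ r, r < N →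
        ((resAt boxGrid N t).getD r []).length = boxGrid.length ∧
        ∀ k, k < boxGrid.length →
          ((resAt boxGrid N t).getD r []).getD k "" =
            if boxGrid.length - t ≤ k then
              (segSettle ((boxGrid.getD (boxGrid.length - 1 - k) []).take N)).getD r ""
            else "." := by
  intro t
  induction t with
  | zero =>
    intro _
    refine ⟨by simp [resAt], fun r hr => ⟨?_, fun k hk => ?_⟩⟩
    · rw [resAt, List.getD_eq_getElem (List.replicate N (List.replicate boxGrid.length "."))
        _ (by simpa using hr)]
      simp
    · rw [resAt, List.getD_eq_getElem (List.replicate N (List.replicate boxGrid.length "."))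
        _ (by simpa using hr), List.getElem_replicate,
        List.getD_eq_getElem (List.replicate boxGrid.length ".") _ (by simpa using hk),
        List.getElem_replicate, if_neg (by omega)]
  | succ t ih =>
    intro ht
    have htM : t < boxGrid.length := by omega
    obtain ⟨hlen, hrow⟩ := ih (by omega)
    have hSlen : (segSettle ((boxGrid.getD t []).take N)).length = N := by
      rw [length_segSettle, List.length_take]
      have : N ≤ (boxGrid.getD t []).length := by
        rw [List.getD_eq_getElem _ _ htM]
        exact hrows _ (List.getElem_mem htM)
      omega
    refine ⟨by rw [resAt, length_overlay, hlen], fun r hr => ?_⟩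
    obtain ⟨hrlen, hent⟩ := hrow r hr
    have hover := getD_overlay_row (boxGrid.length - 1 - t)
      (segSettle ((boxGrid.getD t []).take N)) 0 (resAt boxGrid N t) r
      (by omega) (by rw [hSlen]; omega) (by rw [hlen]; omega)
    simp only [Nat.sub_zero] at hover
    refine ⟨?_, fun k hk => ?_⟩
    · rw [resAt, length_getD_overlay, hrlen]
    · rw [resAt, hover]
      set S := segSettle ((boxGrid.getD t []).take N) with hSdef
      by_cases hkc : k = boxGrid.length - 1 - t
      · have hMk : boxGrid.length - 1 - k = t := by omega
        rw [hMk, ← hSdef]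
        by_cases hS : S.getD r "" = "."
        · rw [if_pos hS, hent k hk, if_neg (by omega), if_pos (by omega), hS]
        · rw [if_neg hS, hkc, getD_set_eq' _ _ _ _ (by rw [hrlen]; omega),
            if_pos (by omega)]
      · have hcond : (boxGrid.length - (t + 1) ≤ k) ↔ (boxGrid.length - t ≤ k) := by omega
        have hsame : (if S.getD r "" = "." then (resAt boxGrid N t).getD r []
            else ((resAt boxGrid N t).getD r []).set (boxGrid.length - 1 - t)
              (S.getD r "")).getD k "" = ((resAt boxGrid N t).getD r []).getD k "" := by
          split_ifs
          · rfl
          · exact getD_set_ne' _ _ _ _ _ (fun h => hkc h.symm)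
        rw [hsame, hent k hk]
        by_cases hge : boxGrid.length - t ≤ k
        · rw [if_pos hge, if_pos (by omega)]
        · rw [if_neg hge, if_neg (by omega)]

theorem rotateTheBox_II_eq (boxGrid : List (List String))
    (hpre : Pre_rotateTheBox_II boxGrid) :
    rotateTheBox_II boxGrid = rotateTheBox_II_alt boxGrid := by
  obtain ⟨hne, hrows⟩ := hpre
  set M : Nat := boxGrid.length with hMdef
  have hM : 0 < M := List.length_pos_iff.mpr hne
  set N : Nat := (boxGrid.headD []).length with hNdef
  have hget0 : PySem.List.pyGetD boxGrid 0 [] = boxGrid.headD [] := by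
    cases boxGrid with
    | nil => exact absurd rfl hne
    | cons a l => rw [PySem.List.pyGetD_zero_cons]; rfl
  have hrows' : ∀ row ∈ boxGrid, N ≤ row.length := hrows
  -- A's initial grid is replicate N (replicate M '.')
  have hres0 : (PySem.List.pyRange 0 (N : Int) 1).map
      (fun _ => List.replicate ((M : Int)).toNat ".") = resAt boxGrid N 0 := by
    rw [resAt, PySem.List.pyRange_one]
    simp [Function.comp_def, List.map_const']
    exact Or.inr hMdef
  -- evaluate port A
  have hA : rotateTheBox_II boxGrid = resAt boxGrid N M := by
    show (PySem.List.pyRange 0 ((boxGrid.length : Nat) : Int) 1).foldl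
        (pvOuterA boxGrid (boxGrid.length : Int)
          ((PySem.List.pyGetD boxGrid 0 []).length : Int))
        ((PySem.List.pyRange 0 ((PySem.List.pyGetD boxGrid 0 []).length : Int) 1).map
          (fun _ => List.replicate ((boxGrid.length : Int)).toNat ".")) = _
    rw [hget0, ← hMdef, ← hNdef, hres0]
    exact outerA_fold boxGrid N hrows' M le_rfl
  obtain ⟨hlenM, hentM⟩ := resAt_entries boxGrid N hrows' M le_rfl
  rw [hA]
  -- evaluate port B and compare entrywise
  show _ = (PySem.List.pyRange 0 ((PySem.List.pyGetD boxGrid 0 []).length : Int) 1).map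
      (fun j => (PySem.List.pyRange 0 ((boxGrid.length : Nat) : Int) 1).map
        (fun k => PySem.List.pyGetD (PySem.List.pyGetD
          (boxGrid.map (fun row => pvSettle (PySem.List.slice row none
            (some ((PySem.List.pyGetD boxGrid 0 []).length : Int))))) ((boxGrid.length : Int) - 1 - k) []) j "."))
  rw [hget0, ← hMdef, ← hNdef]
  have hSlen : ∀ q, q < M → (segSettle ((boxGrid.getD q []).take N)).length = N := by
    intro q hq
    rw [length_segSettle, List.length_take]
    have : N ≤ (boxGrid.getD q []).length := by
      rw [List.getD_eq_getElem _ _ hq]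
      exact hrows' _ (List.getElem_mem hq)
    omega
  apply List.ext_getElem
  · rw [hlenM, List.length_map, PySem.List.length_pyRange_one]
    omega
  · intro r h1 h2
    have hrN : r < N := by rwa [hlenM] at h1
    rw [List.getElem_map, PySem.List.getElem_pyRange_one]
    obtain ⟨hrlen, hent⟩ := hentM r hrN
    rw [show (resAt boxGrid N M)[r] = (resAt boxGrid N M).getD r [] from
      (List.getD_eq_getElem _ _ h1).symm]
    apply List.ext_getElem
    · rw [hrlen, List.length_map, PySem.List.length_pyRange_one]
      omega
    · intro k h3 h4
      have hkM : k < M := by rwa [hrlen] at h3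
      rw [List.getElem_map, PySem.List.getElem_pyRange_one]
      have hcast : (boxGrid.length : Int) - 1 - (0 + (k : Int)) = ((M - 1 - k : Nat) : Int) := by
        rw [← hMdef]; omega
      rw [hcast, PySem.List.pyGetD_natCast]
      have hq : M - 1 - k < M := by omega
      have hmap : (boxGrid.map (fun row => pvSettle (PySem.List.slice row none
          (some (N : Int))))).getD (M - 1 - k) [] =
          segSettle ((boxGrid.getD (M - 1 - k) []).take N) := by
        rw [List.getD_eq_getElem _ _ (by simpa using hq), List.getElem_map]
        rw [PySem.List.slice_to_natCast, pvSettle_eq_segSettle,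
          List.getD_eq_getElem boxGrid _ hq]
      rw [hmap]
      have hSl := hSlen (M - 1 - k) hq
      rw [show (0 : Int) + (r : Int) = ((r : Nat) : Int) by ring,
        PySem.List.pyGetD_natCast]
      have hLHS : ((resAt boxGrid N M).getD r [])[k] =
          ((resAt boxGrid N M).getD r []).getD k "" :=
        (List.getD_eq_getElem _ _ h3).symm
      rw [hLHS]
      rw [← hMdef] at hent
      rw [hent k hkM, if_pos (by omega)]
      have hlast : r < (segSettle (List.take N (boxGrid.getD (M - 1 - k) []))).length := by
        rw [hSl]; exact hrN
      rw [List.getD_eq_getElem _ _ hlast, List.getD_eq_getElem _ _ hlast]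

-- ===== VERDICT (by name: the statement is the Claim_ definition above) =====
theorem rotateTheBox_II_spec : Claim_equal_rotateTheBox_II := by
  intro boxGrid _ hpre
  unfold Spec_rotateTheBox_II
  exact rotateTheBox_II_eq boxGrid hpre
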